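-- pv_equiv track=rewrite | github.com/lukeyigechen/optimality-theory-mark | src/ot_util.py | marks_to_readable_input
-- ===== SOURCE A (Python) =====
-- def marks_to_readable_input(ur, sr, dict_sr_out, dict_dict_cand_out, constraint_list):
--     if constraint_list is None:
--         constraint_list = list(dict_sr_out.keys())
--     str_out = 'UR\t' + ur + '\tStress\t' + '\t'.join(constraint_list) + '\n'
--     list_sr_tmp = []
--     for constraint in constraint_list:
--         list_sr_tmp.append(str(dict_sr_out[constraint]))
--     sr = sr.replace('|', '\t')
--     str_out += 'SR\t' + sr + '\t' + '\t'.join(list_sr_tmp) + '\n'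
--     for k, v in dict_dict_cand_out.items():
--         list_cand_tmp = []
--         is_violated = False
--         for constraint in constraint_list:
--             sr_num_violate = dict_sr_out[constraint]
--             if not is_violated and sr_num_violate < v[constraint]:
--                 list_cand_tmp.append(str(v[constraint]) + '!')
--                 is_violated = True
--             else:
--                 list_cand_tmp.append(str(v[constraint]))
--         k = k.replace('|', '\t')
--         str_out += '\t' + k + '\t' + '\t'.join(list_cand_tmp) + '\n'
--     return str_out
-- ===== SOURCE B (Python) =====
-- def marks_to_readable_input(ur, sr, dict_sr_out, dict_dict_cand_out, constraint_list):
--     if constraint_list is None: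
--         constraint_list = list(dict_sr_out.keys())
--     cands = list(dict_dict_cand_out.items())
--     # first violated column index per candidate (-1 if none)
--     marks = [next((i for i, c in enumerate(constraint_list)
--                    if dict_sr_out[c] < v[c]), -1) for _, v in cands]
--     # build the candidate cell grid COLUMN BY COLUMN, then transpose to rows
--     columns = [[str(v[c]) + ('!' if marks[r] == i else '')
--                 for r, (_, v) in enumerate(cands)]
--                for i, c in enumerate(constraint_list)]
--     rows = [list(t) for t in zip(*columns)] if columns else [[] for _ in cands]
--     header = 'UR\t' + ur + '\tStress\t' + '\t'.join(constraint_list)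
--     sr_row = ('SR\t' + sr.replace('|', '\t') + '\t'
--               + '\t'.join(str(dict_sr_out[c]) for c in constraint_list))
--     body = ['\t' + k.replace('|', '\t') + '\t' + '\t'.join(row)
--             for (k, _), row in zip(cands, rows)]
--     return '\n'.join([header, sr_row] + body) + '\n'
-- ===== Notes on version B (the rewrite author's own statement) =====
-- stated objective: alternative
-- what changed: B builds the candidate table in column-major order: it precomputes each candidate's first-violated column index, constructs the cell grid one CONSTRAINT COLUMN at a time, transposes the grid with zip(*columns) to recover rows, and joins lines once; A walks row by row with a stateful is_violated flag and string concatenation.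
import Mathlib
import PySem

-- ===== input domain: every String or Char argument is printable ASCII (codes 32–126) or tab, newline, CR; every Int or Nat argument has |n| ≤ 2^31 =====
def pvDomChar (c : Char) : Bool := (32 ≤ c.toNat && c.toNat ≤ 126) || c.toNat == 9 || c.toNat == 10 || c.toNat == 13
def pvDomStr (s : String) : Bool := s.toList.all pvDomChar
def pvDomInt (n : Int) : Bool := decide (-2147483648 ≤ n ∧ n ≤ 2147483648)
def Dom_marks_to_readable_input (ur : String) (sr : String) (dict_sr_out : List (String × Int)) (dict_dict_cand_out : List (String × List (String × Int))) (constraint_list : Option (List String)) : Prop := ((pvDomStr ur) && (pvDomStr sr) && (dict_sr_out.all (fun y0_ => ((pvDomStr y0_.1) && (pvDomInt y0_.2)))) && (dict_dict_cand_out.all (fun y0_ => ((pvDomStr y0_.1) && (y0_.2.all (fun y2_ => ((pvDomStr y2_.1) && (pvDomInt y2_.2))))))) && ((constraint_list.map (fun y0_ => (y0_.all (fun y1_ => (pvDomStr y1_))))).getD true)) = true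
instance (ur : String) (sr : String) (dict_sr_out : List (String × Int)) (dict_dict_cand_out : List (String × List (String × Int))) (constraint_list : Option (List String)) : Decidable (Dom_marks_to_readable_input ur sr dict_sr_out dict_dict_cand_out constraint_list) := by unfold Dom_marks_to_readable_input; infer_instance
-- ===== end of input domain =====

-- B builds the candidate table column-major (per-candidate first-violation indices,
-- then one cell column per constraint, then a zip(*columns) transpose and one join);
-- A walks row by row with a stateful is_violated flag. Objective: alternative (same cost).

-- ===== PORT A =====
-- A's inner loop over constraint_list with the is_violated flag, accumulator (cells, flag)
def mtriStepA (d vd : PySem.Dict String Int) (st : List String × Bool) (c : String) : List String × Bool :=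
  let srn := d.getD c 0
  if !st.2 && decide (srn < vd.getD c 0) then
    (st.1 ++ [PySem.Int.toStr (vd.getD c 0) ++ "!"], true)
  else
    (st.1 ++ [PySem.Int.toStr (vd.getD c 0)], st.2)

def marks_to_readable_input (ur : String) (sr : String) (dict_sr_out : List (String × Int)) (dict_dict_cand_out : List (String × List (String × Int))) (constraint_list : Option (List String)) : String :=
  let d := PySem.Dict.ofList dict_sr_out
  let cl := match constraint_list with
    | none => d.keys
    | some l => l
  let str_out := "UR\t" ++ ur ++ "\tStress\t" ++ PySem.Str.join "\t" cl ++ "\n"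
  let list_sr_tmp := cl.foldl (fun acc c => acc ++ [PySem.Int.toStr (d.getD c 0)]) []
  let sr2 := PySem.Str.replace sr "|" "\t"
  let str_out := str_out ++ "SR\t" ++ sr2 ++ "\t" ++ PySem.Str.join "\t" list_sr_tmp ++ "\n"
  (PySem.Dict.ofList dict_dict_cand_out).items.foldl (fun s kv =>
    let vd := PySem.Dict.ofList kv.2
    let list_cand_tmp := (cl.foldl (mtriStepA d vd) ([], false)).1
    s ++ "\t" ++ PySem.Str.replace kv.1 "|" "\t" ++ "\t" ++ PySem.Str.join "\t" list_cand_tmp ++ "\n") str_out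

-- ===== PORT B =====
-- python's zip(*columns): rows of heads while every column is nonempty
def pyZipStar {α : Type} [Inhabited α] : List (List α) → List (List α)
  | [] => []
  | c :: cs =>
    if h : ((c :: cs).all (fun l => !l.isEmpty)) = true then
      ((c :: cs).map (fun l => l.headI)) :: pyZipStar ((c :: cs).map List.tail)
    else []
termination_by cols => cols.headI.length
decreasing_by
  have hc : c.isEmpty = false := by
    have := (List.all_eq_true.mp h) c (by simp)
    simpa using this
  cases c with
  | nil => simp at hc
  | cons a t => simp [List.headI]

def marks_to_readable_input_alt (ur : String) (sr : String) (dict_sr_out : List (String × Int)) (dict_dict_cand_out : List (String × List (String × Int))) (constraint_list : Option (List String)) : String :=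
  let d := PySem.Dict.ofList dict_sr_out
  let cl := constraint_list.getD d.keys
  let cands := (PySem.Dict.ofList dict_dict_cand_out).items
  let marks : List Int := cands.map (fun kv =>
    match cl.findIdx? (fun c => decide (d.getD c 0 < (PySem.Dict.ofList kv.2).getD c 0)) with
    | some i => (i : Int)
    | none => -1)
  let columns : List (List String) := cl.zipIdx.map (fun ci =>
    cands.zipIdx.map (fun rkv =>
      PySem.Int.toStr ((PySem.Dict.ofList rkv.1.2).getD ci.1 0)
        ++ (if marks.getD rkv.2 (-1) == ((ci.2 : Nat) : Int) then "!" else "")))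
  let rows : List (List String) :=
    if columns.isEmpty then cands.map (fun _ => []) else pyZipStar columns
  let header := "UR\t" ++ ur ++ "\tStress\t" ++ PySem.Str.join "\t" cl
  let sr_row := "SR\t" ++ PySem.Str.replace sr "|" "\t" ++ "\t"
      ++ PySem.Str.join "\t" (cl.map (fun c => PySem.Int.toStr (d.getD c 0)))
  let body := (cands.zip rows).map (fun kr =>
      "\t" ++ PySem.Str.replace kr.1.1 "|" "\t" ++ "\t" ++ PySem.Str.join "\t" kr.2)
  PySem.Str.join "\n" ([header, sr_row] ++ body) ++ "\n"

-- ===== PRECONDITION & SPEC =====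
-- Pre_ excludes exactly the inputs where Python A raises KeyError: some constraint of the
-- effective constraint list is missing from dict_sr_out or from some candidate's dict.
def Pre_marks_to_readable_input (ur : String) (sr : String) (dict_sr_out : List (String × Int)) (dict_dict_cand_out : List (String × List (String × Int))) (constraint_list : Option (List String)) : Prop :=
  let d := PySem.Dict.ofList dict_sr_out
  let cl := constraint_list.getD d.keys
  (∀ c ∈ cl, d.contains c = true) ∧
  (∀ kv ∈ (PySem.Dict.ofList dict_dict_cand_out).items, ∀ c ∈ cl, (PySem.Dict.ofList kv.2).contains c = true)
instance (ur : String) (sr : String) (dict_sr_out : List (String × Int)) (dict_dict_cand_out : List (String × List (String × Int))) (constraint_list : Option (List String)) : Decidable (Pre_marks_to_readable_input ur sr dict_sr_out dict_dict_cand_out constraint_list) := by unfold Pre_marks_to_readable_input; infer_instance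

def pvWitness_marks_to_readable_input : String × String × (List (String × Int)) × (List (String × List (String × Int))) × Option (List String) :=
  ("ba", "b|a", [("C1", 0), ("C2", 1)], [("b|a2", [("C1", 1), ("C2", 0)])], none)

def Spec_marks_to_readable_input (ur : String) (sr : String) (dict_sr_out : List (String × Int)) (dict_dict_cand_out : List (String × List (String × Int))) (constraint_list : Option (List String)) (out : String) : Prop := out = marks_to_readable_input_alt ur sr dict_sr_out dict_dict_cand_out constraint_list
instance (ur : String) (sr : String) (dict_sr_out : List (String × Int)) (dict_dict_cand_out : List (String × List (String × Int))) (constraint_list : Option (List String)) (out : String) : Decidable (Spec_marks_to_readable_input ur sr dict_sr_out dict_dict_cand_out constraint_list out) := by unfold Spec_marks_to_readable_input; infer_instance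

-- ===== CLAIM (what is proved, stated in full; the proofs are below) =====
def Claim_equal_marks_to_readable_input : Prop := ∀ (ur : String) (sr : String) (dict_sr_out : List (String × Int)) (dict_dict_cand_out : List (String × List (String × Int))) (constraint_list : Option (List String)), Dom_marks_to_readable_input ur sr dict_sr_out dict_dict_cand_out constraint_list → Pre_marks_to_readable_input ur sr dict_sr_out dict_dict_cand_out constraint_list → Spec_marks_to_readable_input ur sr dict_sr_out dict_dict_cand_out constraint_list (marks_to_readable_input ur sr dict_sr_out dict_dict_cand_out constraint_list)

-- ===== LEMMAS AND PROOFS =====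

-- canonical cell row both sides are reduced to: first violated index found, then '!' patched in
def mtriCells (d vd : PySem.Dict String Int) (cl : List String) : List String :=
  let cells := cl.map (fun c => PySem.Int.toStr (vd.getD c 0))
  match cl.findIdx? (fun c => decide (d.getD c 0 < vd.getD c 0)) with
  | none => cells
  | some j => cells.modify j (· ++ "!")

theorem strJoin_singleton (sep a : String) : PySem.Str.join sep [a] = a := by
  apply String.toList_inj.mp
  simp [PySem.Str.toList_join, PySem.Chars.join_singleton]

theorem strJoin_cons_cons (sep a b : String) (rest : List String) :
    PySem.Str.join sep (a :: b :: rest) = a ++ sep ++ PySem.Str.join sep (b :: rest) := by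
  apply String.toList_inj.mp
  simp [PySem.Str.toList_join, PySem.Chars.join_cons_cons, String.toList_append]

-- A's append-accumulating fold building list_sr_tmp is a map
theorem foldl_append_singleton {α β : Type} (g : α → β) (l : List α) (acc : List β) :
    l.foldl (fun a c => a ++ [g c]) acc = acc ++ l.map g := by
  induction l generalizing acc with
  | nil => simp
  | cons h t ih => simp [List.foldl, ih]

-- once the flag is true, A's inner fold just maps
theorem foldA_true (d vd : PySem.Dict String Int) (cl : List String) (acc : List String) :
    cl.foldl (mtriStepA d vd) (acc, true)
      = (acc ++ cl.map (fun c => PySem.Int.toStr (vd.getD c 0)), true) := by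
  induction cl generalizing acc with
  | nil => simp
  | cons h t ih => simp [List.foldl, mtriStepA, ih]

-- A's stateful flag scan = index-first formatting
theorem foldA_eq_cells (d vd : PySem.Dict String Int) (cl : List String) (acc : List String) :
    (cl.foldl (mtriStepA d vd) (acc, false)).1 = acc ++ mtriCells d vd cl := by
  induction cl generalizing acc with
  | nil => simp [mtriCells]
  | cons h t ih =>
    by_cases hv : d.getD h 0 < vd.getD h 0
    · simp [List.foldl, mtriStepA, hv, foldA_true, mtriCells, List.findIdx?_cons]
    · simp [List.foldl, mtriStepA, hv, ih, mtriCells, List.findIdx?_cons]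
      cases hfi : t.findIdx? (fun c => decide (d.getD c 0 < vd.getD c 0)) <;>
        simp [List.modify]

-- an indexed map that ignores the index is a map
theorem zipIdx_map_fst {α β : Type} (l : List α) (g : α → β) (k : Nat) :
    (l.zipIdx k).map (fun ai => g ai.1) = l.map g := by
  induction l generalizing k with
  | nil => simp
  | cons a t ih => simp [List.zipIdx_cons, ih (k + 1)]

-- B's enumerate-and-compare-with-the-mark cell row = the canonical cell row
theorem zipMark_eq_cells (d vd : PySem.Dict String Int) (cl : List String) :
    (cl.zipIdx).map (fun ci =>
        PySem.Int.toStr (vd.getD ci.1 0)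
          ++ (if (match cl.findIdx? (fun c => decide (d.getD c 0 < vd.getD c 0)) with
                   | some i => (i : Int) | none => -1) == ((ci.2 : Nat) : Int) then "!" else ""))
      = mtriCells d vd cl := by
  induction cl with
  | nil => simp [mtriCells]
  | cons h t ih =>
    simp only [List.findIdx?_cons, List.zipIdx_cons, Nat.zero_add, List.zipIdx_succ,
      List.map_cons, List.map_map]
    by_cases hv : d.getD h 0 < vd.getD h 0
    · simp only [hv, decide_true, if_true]
      have hR : mtriCells d vd (h :: t)
          = (PySem.Int.toStr (vd.getD h 0) ++ "!")
            :: t.map (fun c => PySem.Int.toStr (vd.getD c 0)) := by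
        simp [mtriCells, List.findIdx?_cons, hv, List.modify]
      rw [hR, ← zipIdx_map_fst t (fun c => PySem.Int.toStr (vd.getD c 0)) 0]
      refine List.cons_eq_cons.mpr ⟨by simp, List.map_congr_left ?_⟩
      rintro ⟨a, b⟩ _
      have hb : ¬ ((((0 : Nat)) : Int) == (((b + 1 : Nat)) : Int)) = true := by
        simp only [beq_iff_eq]; push_cast; omega
      simp only [Function.comp, if_neg hb]
      simp
    · simp only [hv, decide_false, Bool.false_eq_true, if_false]
      cases hfi : t.findIdx? (fun c => decide (d.getD c 0 < vd.getD c 0)) with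
      | none =>
        simp only [Option.map_none]
        have hR : mtriCells d vd (h :: t)
            = PySem.Int.toStr (vd.getD h 0)
              :: t.map (fun c => PySem.Int.toStr (vd.getD c 0)) := by
          simp [mtriCells, List.findIdx?_cons, hv, hfi]
        rw [hR, ← zipIdx_map_fst t (fun c => PySem.Int.toStr (vd.getD c 0)) 0]
        have hh : ¬ ((-1 : Int) == (((0 : Nat)) : Int)) = true := by simp
        refine List.cons_eq_cons.mpr ⟨by simp only [if_neg hh]; simp, List.map_congr_left ?_⟩
        rintro ⟨a, b⟩ _
        have hb : ¬ ((-1 : Int) == (((b + 1 : Nat)) : Int)) = true := by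
          simp only [beq_iff_eq]; push_cast; omega
        simp only [Function.comp, if_neg hb]
        simp
      | some j =>
        simp only [Option.map_some]
        simp only [hfi] at ih
        have hR : mtriCells d vd (h :: t)
            = PySem.Int.toStr (vd.getD h 0) :: mtriCells d vd t := by
          simp [mtriCells, List.findIdx?_cons, hv, hfi, List.modify]
        rw [hR, ← ih]
        have hh : ¬ ((((j + 1 : Nat)) : Int) == (((0 : Nat)) : Int)) = true := by
          simp only [beq_iff_eq]; push_cast; omega
        refine List.cons_eq_cons.mpr ⟨by simp only [if_neg hh]; simp, List.map_congr_left ?_⟩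
        rintro ⟨a, b⟩ _
        by_cases hj : j = b
        · simp [Function.comp, hj]
        · have h1 : ¬ ((((j + 1 : Nat)) : Int) == (((b + 1 : Nat)) : Int)) = true := by
            simp only [beq_iff_eq]; push_cast; omega
          have h2 : ¬ ((((j : Nat)) : Int) == (((b : Nat)) : Int)) = true := by
            simp only [beq_iff_eq]; push_cast; omega
          simp only [Function.comp, if_neg h1, if_neg h2]

-- looking an enumerated element's index up in a map over the same list
theorem getD_map_of_mem_zipIdx {α β : Type} (l : List α) (f : α → β) (d : β)
    (p : α × Nat) (hp : p ∈ l.zipIdx) : (l.map f).getD p.2 d = f p.1 := by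
  obtain ⟨x, i⟩ := p
  have h := (List.mk_mem_zipIdx_iff_getElem?.mp hp)
  simp only at h ⊢
  have : (l.map f)[i]? = some (f x) := by
    rw [List.getElem?_map, h]; rfl
  simp [List.getD_eq_getElem?_getD, this]

-- zipping a list with an indexed map over itself
theorem zip_zipIdx_map {α β γ : Type} (l : List α) (h : α × Nat → β) (F : α × β → γ) (k : Nat) :
    (l.zip ((l.zipIdx k).map h)).map F = (l.zipIdx k).map (fun ai => F (ai.1, h ai)) := by
  induction l generalizing k with
  | nil => simp
  | cons a t ih => simp [List.zipIdx_cons, ih (k + 1)]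

-- zipping a list with a map over itself
theorem zip_map_self {α β γ : Type} (l : List α) (f : α → β) (F : α × β → γ) :
    (l.zip (l.map f)).map F = l.map (fun a => F (a, f a)) := by
  induction l with
  | nil => simp
  | cons a t ih => simp [ih]

-- python's zip(*columns) on a rectangular column-major grid is the row-major grid
theorem pyZipStar_grid {γ ρ α : Type} [Inhabited α] (C : List γ) (R : List ρ) (g : γ → ρ → α) (hC : C ≠ []) :
    pyZipStar (C.map (fun c => R.map (g c))) = R.map (fun r => C.map (fun c => g c r)) := by
  induction R generalizing C with
  | nil =>
    obtain ⟨c0, C', rfl⟩ := List.exists_cons_of_ne_nil hC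
    simp [pyZipStar]
  | cons r R' ih =>
    obtain ⟨c0, C', rfl⟩ := List.exists_cons_of_ne_nil hC
    rw [show ((c0 :: C').map (fun c => (r :: R').map (g c)))
        = (r :: R').map (g c0) :: C'.map (fun c => (r :: R').map (g c)) from by simp]
    rw [pyZipStar]
    have hall : (((r :: R').map (g c0) :: C'.map (fun c => (r :: R').map (g c))).all
        (fun l => !l.isEmpty)) = true := by
      simp [List.all_eq_true]
    rw [dif_pos hall]
    have hheads : (((r :: R').map (g c0) :: C'.map (fun c => (r :: R').map (g c))).map
        (fun l => l.headI)) = (c0 :: C').map (fun c => g c r) := by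
      simp [Function.comp, List.map_map]
    have htails : (((r :: R').map (g c0) :: C'.map (fun c => (r :: R').map (g c))).map
        List.tail) = (c0 :: C').map (fun c => R'.map (g c)) := by
      simp [Function.comp, List.map_map]
    rw [hheads, htails, ih _ (by simp)]
    simp

-- B's candidate rows (grid + marks + transpose) = one canonical cell row per candidate
theorem bodyB (d : PySem.Dict String Int) (cands : List (String × List (String × Int))) (cl : List String) :
    (cands.zip
      (if (cl.zipIdx.map (fun ci => cands.zipIdx.map (fun rkv =>
            PySem.Int.toStr ((PySem.Dict.ofList rkv.1.2).getD ci.1 0)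
              ++ (if ((cands.map (fun kv =>
                    match cl.findIdx? (fun c => decide (d.getD c 0 < (PySem.Dict.ofList kv.2).getD c 0)) with
                    | some i => (i : Int) | none => -1)).getD rkv.2 (-1) == ((ci.2 : Nat) : Int)) then "!" else "")))).isEmpty
       then cands.map (fun _ => [])
       else pyZipStar (cl.zipIdx.map (fun ci => cands.zipIdx.map (fun rkv =>
            PySem.Int.toStr ((PySem.Dict.ofList rkv.1.2).getD ci.1 0)
              ++ (if ((cands.map (fun kv =>
                    match cl.findIdx? (fun c => decide (d.getD c 0 < (PySem.Dict.ofList kv.2).getD c 0)) with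
                    | some i => (i : Int) | none => -1)).getD rkv.2 (-1) == ((ci.2 : Nat) : Int)) then "!" else "")))))).map
      (fun kr => "\t" ++ PySem.Str.replace kr.1.1 "|" "\t" ++ "\t" ++ PySem.Str.join "\t" kr.2)
    = cands.map (fun kv => "\t" ++ PySem.Str.replace kv.1 "|" "\t" ++ "\t"
        ++ PySem.Str.join "\t" (mtriCells d (PySem.Dict.ofList kv.2) cl)) := by
  cases cl with
  | nil =>
    simp only [List.zipIdx_nil, List.map_nil, List.isEmpty_nil, if_true]
    rw [zip_map_self]
    simp [mtriCells]
  | cons c0 cl' =>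
    rw [if_neg (by simp [List.zipIdx_cons])]
    have hgrid : pyZipStar ((c0 :: cl').zipIdx.map (fun ci => cands.zipIdx.map (fun rkv =>
            PySem.Int.toStr ((PySem.Dict.ofList rkv.1.2).getD ci.1 0)
              ++ (if ((cands.map (fun kv =>
                    match (c0 :: cl').findIdx? (fun c => decide (d.getD c 0 < (PySem.Dict.ofList kv.2).getD c 0)) with
                    | some i => (i : Int) | none => -1)).getD rkv.2 (-1) == ((ci.2 : Nat) : Int)) then "!" else ""))))
        = cands.zipIdx.map (fun rkv => (c0 :: cl').zipIdx.map (fun ci =>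
            PySem.Int.toStr ((PySem.Dict.ofList rkv.1.2).getD ci.1 0)
              ++ (if ((cands.map (fun kv =>
                    match (c0 :: cl').findIdx? (fun c => decide (d.getD c 0 < (PySem.Dict.ofList kv.2).getD c 0)) with
                    | some i => (i : Int) | none => -1)).getD rkv.2 (-1) == ((ci.2 : Nat) : Int)) then "!" else ""))) :=
      pyZipStar_grid _ _ _ (by simp [List.zipIdx_cons])
    rw [hgrid]
    rw [zip_zipIdx_map cands _ _ 0]
    refine Eq.trans (List.map_congr_left ?_)
      (zipIdx_map_fst cands (fun kv => "\t" ++ PySem.Str.replace kv.1 "|" "\t" ++ "\t"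
        ++ PySem.Str.join "\t" (mtriCells d (PySem.Dict.ofList kv.2) (c0 :: cl'))) 0)
    intro p hp
    simp only []
    congr 1
    rw [List.map_congr_left (g := fun ci : String × Nat =>
          PySem.Int.toStr ((PySem.Dict.ofList p.1.2).getD ci.1 0)
            ++ (if (match (c0 :: cl').findIdx? (fun c => decide (d.getD c 0 < (PySem.Dict.ofList p.1.2).getD c 0)) with
                 | some i => (i : Int) | none => -1) == ((ci.2 : Nat) : Int) then "!" else ""))
        ?_]
    · exact congrArg _ (zipMark_eq_cells d (PySem.Dict.ofList p.1.2) (c0 :: cl'))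
    · intro ci _
      rw [getD_map_of_mem_zipIdx cands _ _ p hp]

-- B's whole output in canonical join form
theorem altB_eq (ur : String) (sr : String) (dso : List (String × Int)) (ddco : List (String × List (String × Int))) (cl? : Option (List String)) :
    marks_to_readable_input_alt ur sr dso ddco cl?
      = PySem.Str.join "\n"
          (("UR\t" ++ ur ++ "\tStress\t" ++ PySem.Str.join "\t" (cl?.getD (PySem.Dict.ofList dso).keys))
           :: ("SR\t" ++ PySem.Str.replace sr "|" "\t" ++ "\t"
                ++ PySem.Str.join "\t" ((cl?.getD (PySem.Dict.ofList dso).keys).map (fun c => PySem.Int.toStr ((PySem.Dict.ofList dso).getD c 0))))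
           :: (PySem.Dict.ofList ddco).items.map (fun kv =>
                "\t" ++ PySem.Str.replace kv.1 "|" "\t" ++ "\t"
                  ++ PySem.Str.join "\t" (mtriCells (PySem.Dict.ofList dso) (PySem.Dict.ofList kv.2) (cl?.getD (PySem.Dict.ofList dso).keys)))) ++ "\n" := by
  unfold marks_to_readable_input_alt
  simp only []
  rw [bodyB (PySem.Dict.ofList dso) ((PySem.Dict.ofList ddco).items) (cl?.getD (PySem.Dict.ofList dso).keys)]
  simp

-- A's row-accumulating fold = prefix ++ concatenation of the rows
theorem foldl_append_eq_foldr {α : Type} (F : α → String) (l : List α) (X : String) :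
    l.foldl (fun s a => s ++ F a) X = X ++ l.foldr (fun a s => F a ++ s) "" := by
  induction l generalizing X with
  | nil => simp
  | cons h t ih =>
    simp only [List.foldl, List.foldr]
    rw [ih, String.append_assoc]

-- B's '\n'.join(lines) + '\n' = the newline-terminated concatenation of the lines
theorem join_newline (a : String) (l : List String) :
    PySem.Str.join "\n" (a :: l) ++ "\n"
      = (a :: l).foldr (fun x s => x ++ ("\n" ++ s)) "" := by
  induction l generalizing a with
  | nil => simp [strJoin_singleton]
  | cons b t ih =>
    rw [strJoin_cons_cons]
    simp only [List.foldr] at ih ⊢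
    rw [String.append_assoc, String.append_assoc, ih b]

-- bridge between the two row concatenations (newline inside the row vs between rows)
theorem foldr_map_newline {α : Type} (F G : α → String) (h : ∀ a, F a = G a ++ "\n") (l : List α) :
    l.foldr (fun a s => F a ++ s) "" = (l.map G).foldr (fun x s => x ++ ("\n" ++ s)) "" := by
  induction l with
  | nil => simp
  | cons hd t ih =>
    simp only [List.foldr, List.map]
    rw [h, ih, String.append_assoc]

-- ===== VERDICT (by name: the statement is the Claim_ definition above) =====
theorem marks_to_readable_input_spec : Claim_equal_marks_to_readable_input := by
  intro ur sr dso ddco cl? _ _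
  unfold Spec_marks_to_readable_input
  rw [altB_eq]
  unfold marks_to_readable_input
  have main : ∀ cl : List String,
      (PySem.Dict.ofList ddco).items.foldl (fun s kv =>
        let vd := PySem.Dict.ofList kv.2
        let list_cand_tmp := (cl.foldl (mtriStepA (PySem.Dict.ofList dso) vd) ([], false)).1
        s ++ "\t" ++ PySem.Str.replace kv.1 "|" "\t" ++ "\t" ++ PySem.Str.join "\t" list_cand_tmp ++ "\n")
        ("UR\t" ++ ur ++ "\tStress\t" ++ PySem.Str.join "\t" cl ++ "\n" ++ "SR\t" ++ PySem.Str.replace sr "|" "\t" ++ "\t"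
          ++ PySem.Str.join "\t" (cl.foldl (fun acc c => acc ++ [PySem.Int.toStr ((PySem.Dict.ofList dso).getD c 0)]) []) ++ "\n")
      = PySem.Str.join "\n"
          (("UR\t" ++ ur ++ "\tStress\t" ++ PySem.Str.join "\t" cl)
           :: ("SR\t" ++ PySem.Str.replace sr "|" "\t" ++ "\t" ++ PySem.Str.join "\t" (cl.map (fun c => PySem.Int.toStr ((PySem.Dict.ofList dso).getD c 0))))
           :: (PySem.Dict.ofList ddco).items.map (fun kv =>
                "\t" ++ PySem.Str.replace kv.1 "|" "\t" ++ "\t" ++ PySem.Str.join "\t" (mtriCells (PySem.Dict.ofList dso) (PySem.Dict.ofList kv.2) cl))) ++ "\n" := by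
    intro cl
    simp only [foldl_append_singleton, List.nil_append, foldA_eq_cells]
    rw [join_newline]
    rw [show (fun (s : String) (kv : String × List (String × Int)) =>
          s ++ "\t" ++ PySem.Str.replace kv.1 "|" "\t" ++ "\t"
            ++ PySem.Str.join "\t" (mtriCells (PySem.Dict.ofList dso) (PySem.Dict.ofList kv.2) cl) ++ "\n")
        = (fun (s : String) (kv : String × List (String × Int)) =>
          s ++ ("\t" ++ PySem.Str.replace kv.1 "|" "\t" ++ "\t"
            ++ PySem.Str.join "\t" (mtriCells (PySem.Dict.ofList dso) (PySem.Dict.ofList kv.2) cl) ++ "\n"))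
        from by funext s kv; simp [String.append_assoc]]
    rw [foldl_append_eq_foldr (fun kv : String × List (String × Int) =>
          "\t" ++ PySem.Str.replace kv.1 "|" "\t" ++ "\t"
            ++ PySem.Str.join "\t" (mtriCells (PySem.Dict.ofList dso) (PySem.Dict.ofList kv.2) cl) ++ "\n")]
    rw [foldr_map_newline
          (fun kv : String × List (String × Int) =>
            "\t" ++ PySem.Str.replace kv.1 "|" "\t" ++ "\t"
              ++ PySem.Str.join "\t" (mtriCells (PySem.Dict.ofList dso) (PySem.Dict.ofList kv.2) cl) ++ "\n")
          (fun kv : String × List (String × Int) =>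
            "\t" ++ PySem.Str.replace kv.1 "|" "\t" ++ "\t"
              ++ PySem.Str.join "\t" (mtriCells (PySem.Dict.ofList dso) (PySem.Dict.ofList kv.2) cl))
          (fun _ => rfl)]
    apply String.toList_inj.mp
    simp [String.toList_append]
  cases cl? with
  | none => simpa using main (PySem.Dict.ofList dso).keys
  | some cl => simpa using main cl
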